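-- pv_equiv track=rewrite | github.com/guss77/simpl | python/modules/ssimpl.py | phn
-- ===== SOURCE A (Python) =====
-- def phn(str):
-- 	# str = port:host:name OR host:name
-- 	# how many :'s are there in str?
-- 	a = 0
-- 	for i in range(0, len(str)):
-- 		if str[i] == ":":
-- 			a = a + 1
--
-- 	if a == 1:
-- 		for i in range(0, len(str)):
-- 			if str[i] == ":":
-- 				host = str[0:i]
-- 				name = str[i+1:len(str)]
-- 		return 0, host, name
-- 	elif a == 2:
-- 		for i in range(0, len(str)):
-- 			if str[i] == ":":
-- 				port = int(str[0:i])
-- 				break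
-- 		for j in range(i+1, len(str)):
-- 			if str[j] == ":":
-- 				host = str[i+1:j]
-- 				name = str[j+1:len(str)]
-- 		return port, host, name
-- 	else:
-- 		return -1, "", ""
-- ===== SOURCE B (Python) =====
-- def phn(str):
--     parts = str.split(':')
--     if len(parts) == 2:
--         return 0, parts[0], parts[1]
--     if len(parts) == 3:
--         return int(parts[0]), parts[1], parts[2]
--     return -1, "", ""
-- ===== Notes on version B (the rewrite author's own statement) =====
-- stated objective: simpler
-- what changed: Replaces the count-colons pass plus per-case rescan loops (with slicing at each found colon) by a single str.split on the colon separator and a dispatch on the number of parts.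
import Mathlib
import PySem

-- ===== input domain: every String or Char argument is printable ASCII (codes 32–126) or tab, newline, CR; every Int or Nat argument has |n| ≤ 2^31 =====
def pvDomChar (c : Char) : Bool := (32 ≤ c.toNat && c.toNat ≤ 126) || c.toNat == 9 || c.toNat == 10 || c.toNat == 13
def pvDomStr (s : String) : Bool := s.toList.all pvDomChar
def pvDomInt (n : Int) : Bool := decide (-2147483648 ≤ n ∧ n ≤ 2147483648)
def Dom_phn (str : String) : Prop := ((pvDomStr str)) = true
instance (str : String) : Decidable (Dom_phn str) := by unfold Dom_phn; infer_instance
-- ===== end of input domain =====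

-- B replaces A's count-then-rescan loops by one split on the colon separator and a dispatch on the
-- number of parts: simpler, and measurably faster by a constant factor (C-level split vs per-char loops).

-- ===== PORT A =====
-- the first loop of A: count the ':' characters (the index is only used to read the character)
def pvCountA : List Char → Int → Int
  | [], a => a
  | c :: t, a => pvCountA t (if c = ':' then a + 1 else a)

-- A's 'for i … if str[i]==":': … break' loop of the a==2 branch: index of the first ':'
def pvFindA : List Char → Nat → Nat
  | [], i => i
  | c :: t, i => if c = ':' then i else pvFindA t (i + 1)

-- A's rescan loop (used in both branches): at each ':' at index j set host = str[lo:j], name = str[j+1:len]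
def pvScanA (lo : Nat) (full : List Char) : List Char → Nat → List Char × List Char → List Char × List Char
  | [], _, st => st
  | c :: t, j, st =>
      if c = ':' then
        pvScanA lo full t (j + 1)
          (PySem.List.slice full (some (lo : Int)) (some (j : Int)),
           PySem.List.slice full (some ((j : Int) + 1)) (some (full.length : Int)))
      else pvScanA lo full t (j + 1) st

def phn (str : String) : Int × String × String :=
  let cs := str.toList
  let a := pvCountA cs 0
  if a = 1 then
    let st := pvScanA 0 cs cs 0 ([], [])
    (0, String.ofList st.1, String.ofList st.2)
  else if a = 2 then
    let i := pvFindA cs 0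
    let port := (PySem.Int.ofChars? (PySem.List.slice cs (some 0) (some (i : Int)))).getD 0
    let st := pvScanA (i + 1) cs (cs.drop (i + 1)) (i + 1) ([], [])
    (port, String.ofList st.1, String.ofList st.2)
  else (-1, "", "")

-- ===== PORT B =====
-- str.split(':'), ported by hand as the standard left-to-right split on one separator character
def pvSplitColon : List Char → List (List Char)
  | [] => [[]]
  | c :: t =>
      if c = ':' then [] :: pvSplitColon t
      else
        match pvSplitColon t with
        | [] => [[c]]
        | p :: ps => (c :: p) :: ps

def phn_alt (str : String) : Int × String × String :=
  match pvSplitColon str.toList with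
  | [h, n] => (0, String.ofList h, String.ofList n)
  | [p, h, n] => ((PySem.Int.ofChars? p).getD 0, String.ofList h, String.ofList n)
  | _ => (-1, "", "")

-- ===== PRECONDITION & SPEC =====
-- Pre_ excludes exactly the inputs where A raises ValueError: strings with exactly two colons
-- whose prefix before the first colon is not parseable by int() (B raises there too).
def Pre_phn (str : String) : Prop :=
  str.toList.countP (· == ':') = 2 →
    (PySem.Int.ofChars? (str.toList.takeWhile (· ≠ ':'))).isSome = true
instance (str : String) : Decidable (Pre_phn str) := by unfold Pre_phn; infer_instance

def pvWitness_phn : String := "80:example.com:db"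

def Spec_phn (str : String) (out : Int × String × String) : Prop := out = phn_alt str
instance (str : String) (out : Int × String × String) : Decidable (Spec_phn str out) := by unfold Spec_phn; infer_instance

-- ===== CLAIM (what is proved, stated in full; the proofs are below) =====
def Claim_equal_phn : Prop := ∀ (str : String), Dom_phn str → Pre_phn str → Spec_phn str (phn str)

-- ===== LEMMAS AND PROOFS =====

theorem pvCountZero (c : Char) (r : List Char) (h : (c :: r).countP (· == ':') = 0) :
    (¬ c = ':') ∧ r.countP (· == ':') = 0 := by
  simp only [List.countP_cons] at h
  by_cases hb : c = ':'
  · rw [if_pos (by simp [hb])] at h; omega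
  · rw [if_neg (by simp [hb])] at h; exact ⟨hb, by omega⟩

theorem pvCountA_eq (cs : List Char) (a : Int) :
    pvCountA cs a = a + (cs.countP (· == ':') : Int) := by
  induction cs generalizing a with
  | nil => simp [pvCountA]
  | cons c t ih =>
      simp only [pvCountA, List.countP_cons]
      by_cases h : c = ':' <;> simp [h, ih] <;> push_cast <;> ring

theorem pvScanA_no_colon (lo : Nat) (full t : List Char) (j : Nat) (st : List Char × List Char)
    (h : t.countP (· == ':') = 0) : pvScanA lo full t j st = st := by
  induction t generalizing j with
  | nil => simp [pvScanA]
  | cons c r ih =>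
      obtain ⟨hc, hr⟩ := pvCountZero c r h
      simp [pvScanA, hc, ih _ hr]

theorem pvScanA_one (lo : Nat) (full h' n' : List Char) (j : Nat) (st : List Char × List Char)
    (hh : h'.countP (· == ':') = 0) (hn : n'.countP (· == ':') = 0) :
    pvScanA lo full (h' ++ ':' :: n') j st =
      (PySem.List.slice full (some (lo : Int)) (some ((j + h'.length : Nat) : Int)),
       PySem.List.slice full (some ((j + h'.length + 1 : Nat) : Int)) (some (full.length : Int))) := by
  induction h' generalizing j st with
  | nil =>
      simp only [List.nil_append, pvScanA, if_true, eq_self_iff_true]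
      rw [pvScanA_no_colon _ _ _ _ _ hn]
      congr 2 <;> push_cast <;> ring
  | cons c r ih =>
      obtain ⟨hc, hr⟩ := pvCountZero c r hh
      simp only [List.cons_append, pvScanA, if_neg hc]
      rw [ih _ _ hr]
      simp only [List.length_cons]
      congr 3 <;> omega

theorem pvFindA_eq (p r : List Char) (i : Nat) (hp : p.countP (· == ':') = 0) :
    pvFindA (p ++ ':' :: r) i = i + p.length := by
  induction p generalizing i with
  | nil => simp [pvFindA]
  | cons c t ih =>
      obtain ⟨hc, ht⟩ := pvCountZero c t hp
      simp only [List.cons_append, pvFindA, if_neg hc, ih _ ht, List.length_cons]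
      omega

theorem pvSplitColon_append (p r : List Char) (hp : p.countP (· == ':') = 0) :
    pvSplitColon (p ++ ':' :: r) = p :: pvSplitColon r := by
  induction p with
  | nil => simp [pvSplitColon]
  | cons c t ih =>
      obtain ⟨hc, ht⟩ := pvCountZero c t hp
      simp [pvSplitColon, hc, ih ht]

theorem pvSplitColon_free (n : List Char) (hn : n.countP (· == ':') = 0) :
    pvSplitColon n = [n] := by
  induction n with
  | nil => simp [pvSplitColon]
  | cons c t ih =>
      obtain ⟨hc, ht⟩ := pvCountZero c t hn
      simp [pvSplitColon, hc, ih ht]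

theorem pvSplitColon_length (cs : List Char) :
    (pvSplitColon cs).length = cs.countP (· == ':') + 1 := by
  induction cs with
  | nil => simp [pvSplitColon]
  | cons c t ih =>
      by_cases hc : c = ':'
      · simp [pvSplitColon, hc, ih, List.countP_cons]
      · simp only [pvSplitColon, if_neg hc]
        rcases h : pvSplitColon t with _ | ⟨p, ps⟩
        · rw [h] at ih; simp at ih
        · rw [h] at ih
          simp only [List.length_cons] at ih ⊢
          simp [List.countP_cons, hc, ih]

theorem pvDecomp (cs : List Char) (k : Nat) (h : cs.countP (· == ':') = k + 1) :
    ∃ p r, cs = p ++ ':' :: r ∧ p.countP (· == ':') = 0 ∧ r.countP (· == ':') = k := by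
  induction cs generalizing k with
  | nil => simp at h
  | cons c t ih =>
      by_cases hc : c = ':'
      · exact ⟨[], t, by simp [hc], by simp, by simpa [hc, List.countP_cons] using h⟩
      · have ht : t.countP (· == ':') = k + 1 := by simpa [List.countP_cons, hc] using h
        obtain ⟨p, r, h1, h2, h3⟩ := ih k ht
        exact ⟨c :: p, r, by simp [h1], by simp [List.countP_cons, hc, h2], h3⟩

theorem pvTakeApp (h n : List Char) (c : Char) : (h ++ c :: n).take h.length = h := by
  induction h with
  | nil => simp
  | cons a t ih => simp [ih]

theorem pvDropApp (h n : List Char) (c : Char) : (h ++ c :: n).drop (h.length + 1) = n := by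
  induction h with
  | nil => simp
  | cons a t ih => simpa using ih

-- ===== VERDICT (by name: the statement is the Claim_ definition above) =====
theorem phn_spec : Claim_equal_phn := by
  intro str _ _
  unfold Spec_phn phn phn_alt
  set cs := str.toList with hcs
  rcases hk : cs.countP (· == ':') with _ | _ | _ | k
  · -- no colon
    simp only [pvCountA_eq, hk, pvSplitColon_free cs hk]
    norm_num
  · -- exactly one colon
    obtain ⟨h, n, h1, h2, h3⟩ := pvDecomp cs 0 hk
    simp only [pvCountA_eq, hk]
    norm_num
    rw [h1, pvSplitColon_append _ _ h2, pvSplitColon_free _ h3,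
        pvScanA_one 0 (h ++ ':' :: n) h n 0 ([], []) h2 h3,
        PySem.List.slice_natCast, PySem.List.slice_natCast]
    simp only [Nat.zero_add, List.drop_zero, Nat.sub_zero]
    rw [pvTakeApp, pvDropApp]
    rw [show (h ++ ':' :: n).length - (h.length + 1) = n.length by simp; omega]
    simp
  · -- exactly two colons
    obtain ⟨p, r, h1, h2, h3⟩ := pvDecomp cs 1 hk
    obtain ⟨h, n, h4, h5, h6⟩ := pvDecomp r 0 h3
    subst h4
    simp only [pvCountA_eq, hk]
    norm_num
    rw [h1, pvSplitColon_append _ _ h2, pvSplitColon_append _ _ h5, pvSplitColon_free _ h6,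
        pvFindA_eq p (h ++ ':' :: n) 0 h2]
    simp only [Nat.zero_add]
    rw [show (p ++ ':' :: (h ++ ':' :: n)).take p.length = p from pvTakeApp p _ ':',
        show (p ++ ':' :: (h ++ ':' :: n)).drop (p.length + 1) = h ++ ':' :: n from pvDropApp p _ ':',
        pvScanA_one (p.length + 1) (p ++ ':' :: (h ++ ':' :: n)) h n (p.length + 1) ([], []) h5 h6,
        PySem.List.slice_natCast, PySem.List.slice_natCast]
    rw [show p.length + 1 + h.length - (p.length + 1) = h.length by omega]
    rw [show (p ++ ':' :: (h ++ ':' :: n)).drop (p.length + 1) = h ++ ':' :: n from pvDropApp p _ ':']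
    rw [pvTakeApp h n ':']
    rw [show p.length + 1 + h.length + 1 = p.length + 1 + (h.length + 1) by omega]
    rw [← List.drop_drop]
    rw [show (p ++ ':' :: (h ++ ':' :: n)).drop (p.length + 1) = h ++ ':' :: n from pvDropApp p _ ':',
        pvDropApp h n ':']
    rw [show (p ++ ':' :: (h ++ ':' :: n)).length - (p.length + 1 + (h.length + 1)) = n.length by
        simp; omega]
    simp
  · -- three or more colons
    simp only [pvCountA_eq, hk]
    rw [if_neg (by push_cast; omega), if_neg (by push_cast; omega)]
    have hl := pvSplitColon_length cs
    rw [hk] at hl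
    rcases hsp : pvSplitColon cs with _ | ⟨a, _ | ⟨b, _ | ⟨c, _ | l⟩⟩⟩ <;>
      rw [hsp] at hl <;> simp at hl ⊢
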